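-- pv_equiv track=rewrite | github.com/Livi005/Proyecto_IA_HEX | player.py | puentes_pendientes
-- ===== SOURCE A (Python) =====
-- def puentes_pendientes(tablero, jugador):
--     tamaño = len(tablero)
--     pendientes = set()
--     adyacentes = lambda i, j: [(i + di, j + dj) for (di, dj) in [(-1, 0), (-1, 1), (0, -1), (0, 1), (1, -1), (1, 0)]
--                                 if 0 <= i + di < tamaño and 0 <= j + dj < tamaño]
--
--     def hay_puente(p1, p2):
--         i1, j1 = p1
--         i2, j2 = p2
--         return (abs(i1 - i2) == 2 and abs(j1 - j2) == 1) or (abs(i1 - i2) == 1 and abs(j1 - j2) == 2)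
--
--     fichas = [(i, j) for i in range(tamaño) for j in range(tamaño) if tablero[i][j] == jugador]
--     for i in range(len(fichas)):
--         for j in range(i + 1, len(fichas)):
--             f1, f2 = fichas[i], fichas[j]
--             if hay_puente(f1, f2):
--                 comunes = set(adyacentes(*f1)).intersection(adyacentes(*f2))
--                 for p in comunes:
--                     if tablero[p[0]][p[1]] == 0:
--                         pendientes.add(p)
--     return pendientes
-- ===== SOURCE B (Python) =====
-- def es_puente(p, q):
--     return (abs(p[0] - q[0]) == 2 and abs(p[1] - q[1]) == 1) or \
--            (abs(p[0] - q[0]) == 1 and abs(p[1] - q[1]) == 2)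
--
-- def puentes_pendientes(tablero, jugador):
--     n = len(tablero)
--     pendientes = set()
--     for i in range(n):
--         for j in range(n):
--             if tablero[i][j] == 0:
--                 vecinos = [(i + di, j + dj)
--                            for di, dj in [(-1, 0), (-1, 1), (0, -1), (0, 1), (1, -1), (1, 0)]
--                            if 0 <= i + di < n and 0 <= j + dj < n and tablero[i + di][j + dj] == jugador]
--                 if any(es_puente(p, q) for k, p in enumerate(vecinos) for q in vecinos[k + 1:]):
--                     pendientes.add((i, j))
--     return pendientes
-- ===== Notes on version B (the rewrite author's own statement) =====
-- stated objective: alternative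
-- what changed: Instead of scanning all pairs of the player's pieces and intersecting their neighbour lists, B scans each empty cell once and checks whether two of its at-most-six in-bounds neighbours holding the player's piece are at bridge distance (the six symmetric offsets make the two formulations coincide).
import Mathlib
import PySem

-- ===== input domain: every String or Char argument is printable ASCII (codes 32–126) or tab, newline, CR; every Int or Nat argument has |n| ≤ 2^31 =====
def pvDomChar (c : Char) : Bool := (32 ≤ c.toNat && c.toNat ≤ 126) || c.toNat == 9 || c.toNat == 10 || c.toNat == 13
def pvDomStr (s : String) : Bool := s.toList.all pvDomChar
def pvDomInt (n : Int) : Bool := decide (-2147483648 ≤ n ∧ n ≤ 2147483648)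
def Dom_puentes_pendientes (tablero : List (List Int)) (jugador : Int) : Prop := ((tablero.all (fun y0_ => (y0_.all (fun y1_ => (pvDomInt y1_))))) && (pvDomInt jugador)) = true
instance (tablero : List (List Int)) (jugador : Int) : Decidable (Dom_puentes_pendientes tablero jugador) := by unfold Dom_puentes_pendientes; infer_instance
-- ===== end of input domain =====

-- B replaces A's scan over all pairs of the player's pieces by a row-major scan over the board
-- that pair-checks only the ≤6 neighbours of each empty cell (alternative decomposition).
-- Both Pythons return a SET (unordered); each port lists that set canonically: port A returns the
-- set sorted by row-major position (an order-free value has no canonical listing of its own), and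
-- port B's scan produces that row-major order directly.

-- shared literal pieces of both Pythons: tablero[i][j], the six hex offsets, the bridge predicate
def cellAt (t : List (List Int)) (i j : Int) : Int :=
  PySem.List.pyGetD (PySem.List.pyGetD t i []) j 0

def hexOffs : List (Int × Int) := [(-1, 0), (-1, 1), (0, -1), (0, 1), (1, -1), (1, 0)]

def hayPuente (p1 p2 : Int × Int) : Bool :=
  (|p1.1 - p2.1| == 2 && |p1.2 - p2.2| == 1) || (|p1.1 - p2.1| == 1 && |p1.2 - p2.2| == 2)

-- ===== PORT A =====
def adyA (n i j : Int) : List (Int × Int) :=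
  (hexOffs.filter (fun d =>
      decide (0 ≤ i + d.1) && decide (i + d.1 < n) && decide (0 ≤ j + d.2) && decide (j + d.2 < n))).map
    (fun d => (i + d.1, j + d.2))

def fichasA (t : List (List Int)) (jug : Int) : List (Int × Int) :=
  (PySem.List.pyRange 0 (t.length : Int) 1).flatMap (fun i =>
    ((PySem.List.pyRange 0 (t.length : Int) 1).filter (fun j => cellAt t i j == jug)).map
      (fun j => (i, j)))

def puentes_pendientes (tablero : List (List Int)) (jugador : Int) : List (Int × Int) :=
  let n : Int := (tablero.length : Int)
  let fichas := fichasA tablero jugador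
  let pendientes : PySem.Set (Int × Int) :=
    (PySem.List.pyRange 0 (fichas.length : Int) 1).foldl (fun s i =>
      (PySem.List.pyRange (i + 1) (fichas.length : Int) 1).foldl (fun s j =>
        let f1 := PySem.List.pyGetD fichas i (0, 0)
        let f2 := PySem.List.pyGetD fichas j (0, 0)
        if hayPuente f1 f2 then
          (PySem.Set.inter (PySem.Set.ofList (adyA n f1.1 f1.2)) (adyA n f2.1 f2.2)).foldl
            (fun s p => if cellAt tablero p.1 p.2 == 0 then PySem.Set.add s p else s) s
        else s) s) PySem.Set.empty
  -- the Python returns the set 'pendientes' (no defined order); canonical row-major listing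
  PySem.List.sorted pendientes (fun p => p.1 * n + p.2) false

-- ===== PORT B =====
def vecinosB (t : List (List Int)) (jug n i j : Int) : List (Int × Int) :=
  (hexOffs.filter (fun d =>
      decide (0 ≤ i + d.1) && decide (i + d.1 < n) && decide (0 ≤ j + d.2) && decide (j + d.2 < n) &&
        (cellAt t (i + d.1) (j + d.2) == jug))).map
    (fun d => (i + d.1, j + d.2))

def puentes_pendientes_alt (tablero : List (List Int)) (jugador : Int) : List (Int × Int) :=
  let n : Int := (tablero.length : Int)
  (PySem.List.pyRange 0 n 1).foldl (fun s i =>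
    (PySem.List.pyRange 0 n 1).foldl (fun s j =>
      if cellAt tablero i j == 0 then
        let vecinos := vecinosB tablero jugador n i j
        if (PySem.List.enumerate vecinos 0).any (fun kp =>
            (PySem.List.slice vecinos (some (kp.1 + 1)) none).any (fun q => hayPuente kp.2 q)) then
          PySem.Set.add s (i, j)
        else s
      else s) s) (PySem.Set.empty : PySem.Set (Int × Int))

-- ===== PRECONDITION & SPEC =====
-- Pre_ excludes exactly the boards on which the Python A raises an IndexError:
-- A reads tablero[i][j] for every i, j < len(tablero), so every row must have length ≥ len(tablero).
def Pre_puentes_pendientes (tablero : List (List Int)) (jugador : Int) : Prop :=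
  ∀ row ∈ tablero, tablero.length ≤ row.length
instance (tablero : List (List Int)) (jugador : Int) : Decidable (Pre_puentes_pendientes tablero jugador) := by
  unfold Pre_puentes_pendientes; infer_instance

def pvWitness_puentes_pendientes : List (List Int) × Int := ([[0, 1], [1, 0]], 1)

def Spec_puentes_pendientes (tablero : List (List Int)) (jugador : Int) (out : List (Int × Int)) : Prop :=
  out = puentes_pendientes_alt tablero jugador
instance (tablero : List (List Int)) (jugador : Int) (out : List (Int × Int)) : Decidable (Spec_puentes_pendientes tablero jugador out) := by
  unfold Spec_puentes_pendientes; infer_instance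

-- ===== CLAIM (what is proved, stated in full; the proofs are below) =====
def Claim_equal_puentes_pendientes : Prop := ∀ (tablero : List (List Int)) (jugador : Int), Dom_puentes_pendientes tablero jugador → Pre_puentes_pendientes tablero jugador → Spec_puentes_pendientes tablero jugador (puentes_pendientes tablero jugador)

-- ===== LEMMAS AND PROOFS =====

-- the common mathematical content: p is a pending bridge cell
def InB (n : Int) (p : Int × Int) : Prop := 0 ≤ p.1 ∧ p.1 < n ∧ 0 ≤ p.2 ∧ p.2 < n
def Ficha (t : List (List Int)) (jug : Int) (q : Int × Int) : Prop :=
  InB (t.length : Int) q ∧ cellAt t q.1 q.2 = jug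
def Adj (p q : Int × Int) : Prop := ∃ d ∈ hexOffs, q = (p.1 + d.1, p.2 + d.2)
def Pend (t : List (List Int)) (jug : Int) (p : Int × Int) : Prop :=
  InB (t.length : Int) p ∧ cellAt t p.1 p.2 = 0 ∧
    ∃ q1 q2, Ficha t jug q1 ∧ Ficha t jug q2 ∧ hayPuente q1 q2 = true ∧ Adj p q1 ∧ Adj p q2

lemma hay_symm (x y : Int × Int) : hayPuente x y = hayPuente y x := by
  simp only [hayPuente, abs_sub_comm]

lemma hay_irrefl (x : Int × Int) : hayPuente x x = false := by
  simp [hayPuente]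

lemma adj_symm {p q : Int × Int} (h : Adj p q) : Adj q p := by
  obtain ⟨px, py⟩ := p
  obtain ⟨⟨dx, dy⟩, hd, rfl⟩ := h
  fin_cases hd
  · exact ⟨(1, 0), by decide, by simp⟩
  · exact ⟨(1, -1), by decide, by simp⟩
  · exact ⟨(0, 1), by decide, by simp⟩
  · exact ⟨(0, -1), by decide, by simp⟩
  · exact ⟨(-1, 1), by decide, by simp⟩
  · exact ⟨(-1, 0), by decide, by simp⟩

-- generic foldl machinery
lemma mem_foldl_iff {α β : Type} (f : List α → β → List α) (C : β → α → Prop)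
    (h : ∀ s b p, p ∈ f s b ↔ p ∈ s ∨ C b p) (l : List β) :
    ∀ (s : List α) (p : α), p ∈ l.foldl f s ↔ p ∈ s ∨ ∃ b ∈ l, C b p := by
  induction l with
  | nil => simp
  | cons b l ih =>
    intro s p
    simp only [List.foldl_cons, ih, h, List.mem_cons]
    constructor
    · rintro (⟨hs | hc⟩ | ⟨b', hb', hc⟩)
      · exact Or.inl hs
      · exact Or.inr ⟨b, Or.inl rfl, hc⟩
      · exact Or.inr ⟨b', Or.inr hb', hc⟩
    · rintro (hs | ⟨b', hb' | hb', hc⟩)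
      · exact Or.inl (Or.inl hs)
      · exact Or.inl (Or.inr (hb' ▸ hc))
      · exact Or.inr ⟨b', hb', hc⟩

lemma nodup_foldl {α β : Type} (f : List α → β → List α)
    (h : ∀ s b, s.Nodup → (f s b).Nodup) (l : List β) :
    ∀ s : List α, s.Nodup → (l.foldl f s).Nodup := by
  induction l with
  | nil => exact fun s hs => hs
  | cons b l ih => exact fun s hs => ih _ (h s b hs)

lemma exists_lt_pair_iff {α : Type} (l : List α) (R : α → α → Prop)
    (hsym : ∀ x y, R x y → R y x) (hirr : ∀ x, ¬ R x x) :
    (∃ (a : Nat) (ha : a < l.length) (b : Nat) (hb : b < l.length), a < b ∧ R l[a] l[b]) ↔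
      (∃ x ∈ l, ∃ y ∈ l, R x y) := by
  constructor
  · rintro ⟨a, ha, b, hb, _, hr⟩
    exact ⟨_, List.getElem_mem ha, _, List.getElem_mem hb, hr⟩
  · rintro ⟨x, hx, y, hy, hr⟩
    obtain ⟨a, ha, rfl⟩ := List.getElem_of_mem hx
    obtain ⟨b, hb, rfl⟩ := List.getElem_of_mem hy
    rcases lt_trichotomy a b with h | h | h
    · exact ⟨a, ha, b, hb, h, hr⟩
    · subst h; exact absurd hr (hirr _)
    · exact ⟨b, hb, a, ha, h, hsym _ _ hr⟩

-- membership characterisations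
lemma mem_adyA {n i j : Int} {p : Int × Int} :
    p ∈ adyA n i j ↔ (Adj (i, j) p ∧ InB n p) := by
  simp only [adyA, List.mem_map, List.mem_filter, Bool.and_eq_true, decide_eq_true_eq, Adj, InB]
  constructor
  · rintro ⟨d, ⟨hd, hb⟩, rfl⟩
    exact ⟨⟨d, hd, rfl⟩, by simp only [and_assoc] at hb ⊢; exact hb⟩
  · rintro ⟨⟨d, hd, rfl⟩, hb⟩
    exact ⟨d, ⟨hd, by simp only [and_assoc] at hb ⊢; exact hb⟩, rfl⟩

lemma mem_fichasA {t : List (List Int)} {jug : Int} {q : Int × Int} :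
    q ∈ fichasA t jug ↔ Ficha t jug q := by
  simp only [fichasA, List.mem_flatMap, List.mem_map, List.mem_filter,
    PySem.List.mem_pyRange_one, beq_iff_eq, Ficha, InB]
  constructor
  · rintro ⟨i, hi, j, ⟨hj, hc⟩, rfl⟩
    exact ⟨⟨hi.1, hi.2, hj.1, hj.2⟩, hc⟩
  · rintro ⟨⟨h1, h2, h3, h4⟩, hc⟩
    exact ⟨q.1, ⟨h1, h2⟩, q.2, ⟨⟨h3, h4⟩, hc⟩, rfl⟩

lemma mem_vecinosB {t : List (List Int)} {jug n i j : Int} {q : Int × Int} :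
    q ∈ vecinosB t jug n i j ↔ (Adj (i, j) q ∧ InB n q ∧ cellAt t q.1 q.2 = jug) := by
  simp only [vecinosB, List.mem_map, List.mem_filter, Bool.and_eq_true, decide_eq_true_eq,
    beq_iff_eq, Adj, InB]
  constructor
  · rintro ⟨d, ⟨hd, hb⟩, rfl⟩
    refine ⟨⟨d, hd, rfl⟩, ?_, ?_⟩ <;> simp_all
  · rintro ⟨⟨d, hd, rfl⟩, hb, hc⟩
    exact ⟨d, ⟨hd, by simp_all⟩, rfl⟩

-- A's nested pair loop, written without the lets (definitionally equal to the port's body)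
def pendAset (t : List (List Int)) (jug : Int) : List (Int × Int) :=
  (PySem.List.pyRange 0 (((fichasA t jug).length : Nat) : Int) 1).foldl (fun s i =>
    (PySem.List.pyRange (i + 1) (((fichasA t jug).length : Nat) : Int) 1).foldl (fun s j =>
      if hayPuente (PySem.List.pyGetD (fichasA t jug) i (0, 0)) (PySem.List.pyGetD (fichasA t jug) j (0, 0)) then
        (PySem.Set.inter
            (PySem.Set.ofList (adyA (t.length : Int) (PySem.List.pyGetD (fichasA t jug) i (0, 0)).1
              (PySem.List.pyGetD (fichasA t jug) i (0, 0)).2))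
            (adyA (t.length : Int) (PySem.List.pyGetD (fichasA t jug) j (0, 0)).1
              (PySem.List.pyGetD (fichasA t jug) j (0, 0)).2)).foldl
          (fun s p => if cellAt t p.1 p.2 == 0 then PySem.Set.add s p else s) s
      else s) s) PySem.Set.empty

lemma puentes_pendientes_eq_sorted (t : List (List Int)) (jug : Int) :
    puentes_pendientes t jug
      = PySem.List.sorted (pendAset t jug) (fun p => p.1 * (t.length : Int) + p.2) false := rfl

lemma mem_inner_fold {t : List (List Int)} (comunes : List (Int × Int)) :
    ∀ (s : List (Int × Int)) (p : Int × Int),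
      p ∈ comunes.foldl (fun s q => if cellAt t q.1 q.2 == 0 then PySem.Set.add s q else s) s ↔
        p ∈ s ∨ (p ∈ comunes ∧ cellAt t p.1 p.2 = 0) := by
  intro s p
  rw [mem_foldl_iff (C := fun q p => p = q ∧ cellAt t q.1 q.2 = 0)]
  · constructor
    · rintro (hs | ⟨q, hq, rfl, hc⟩)
      · exact Or.inl hs
      · exact Or.inr ⟨hq, hc⟩
    · rintro (hs | ⟨hq, hc⟩)
      · exact Or.inl hs
      · exact Or.inr ⟨p, hq, rfl, hc⟩
  · intro s q p'
    split_ifs with hc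
    · simp only [PySem.Set.mem_add]
      constructor
      · rintro (hs | rfl)
        · exact Or.inl hs
        · exact Or.inr ⟨rfl, by simpa using hc⟩
      · rintro (hs | ⟨rfl, _⟩)
        · exact Or.inl hs
        · exact Or.inr rfl
    · constructor
      · exact Or.inl
      · rintro (hs | ⟨rfl, hc'⟩)
        · exact hs
        · exact absurd hc' (by simpa using hc)

def RA (t : List (List Int)) (p x y : Int × Int) : Prop :=
  hayPuente x y = true ∧ p ∈ adyA (t.length : Int) x.1 x.2 ∧ p ∈ adyA (t.length : Int) y.1 y.2

lemma mem_pendAset {t : List (List Int)} {jug : Int} {p : Int × Int} :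
    p ∈ pendAset t jug ↔ Pend t jug p := by
  classical
  have key : p ∈ pendAset t jug ↔
      ∃ i ∈ PySem.List.pyRange 0 (((fichasA t jug).length : Nat) : Int) 1,
        ∃ j ∈ PySem.List.pyRange (i + 1) (((fichasA t jug).length : Nat) : Int) 1,
          RA t p (PySem.List.pyGetD (fichasA t jug) i (0, 0))
            (PySem.List.pyGetD (fichasA t jug) j (0, 0)) ∧
            cellAt t p.1 p.2 = 0 := by
    unfold pendAset
    rw [mem_foldl_iff (C := fun i p =>
      ∃ j ∈ PySem.List.pyRange (i + 1) (((fichasA t jug).length : Nat) : Int) 1,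
        RA t p (PySem.List.pyGetD (fichasA t jug) i (0, 0))
          (PySem.List.pyGetD (fichasA t jug) j (0, 0)) ∧ cellAt t p.1 p.2 = 0)]
    · simp only [PySem.Set.empty, List.not_mem_nil, false_or]
    · intro s i p'
      rw [mem_foldl_iff (C := fun j p' =>
        RA t p' (PySem.List.pyGetD (fichasA t jug) i (0, 0))
          (PySem.List.pyGetD (fichasA t jug) j (0, 0)) ∧ cellAt t p'.1 p'.2 = 0)]
      intro s' j p''
      split_ifs with hp
      · rw [mem_inner_fold]
        simp only [RA, PySem.Set.mem_inter, PySem.Set.mem_ofList]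
        tauto
      · simp only [RA]
        constructor
        · exact Or.inl
        · rintro (hs | ⟨⟨hhay, _⟩, _⟩)
          · exact hs
          · exact absurd hhay (by simpa using hp)
  rw [key]
  have idx : (∃ i ∈ PySem.List.pyRange 0 (((fichasA t jug).length : Nat) : Int) 1,
        ∃ j ∈ PySem.List.pyRange (i + 1) (((fichasA t jug).length : Nat) : Int) 1,
          RA t p (PySem.List.pyGetD (fichasA t jug) i (0, 0))
            (PySem.List.pyGetD (fichasA t jug) j (0, 0)) ∧
            cellAt t p.1 p.2 = 0) ↔
      ((∃ (a : Nat) (ha : a < (fichasA t jug).length) (b : Nat)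
          (hb : b < (fichasA t jug).length), a < b ∧ RA t p (fichasA t jug)[a] (fichasA t jug)[b]) ∧
        cellAt t p.1 p.2 = 0) := by
    constructor
    · rintro ⟨i, hi, j, hj, hr, hc⟩
      rw [PySem.List.mem_pyRange_one] at hi hj
      have h1 : (0:Int) ≤ i := hi.1
      have h2 : i < ((fichasA t jug).length : Int) := hi.2
      have h3 : i + 1 ≤ j := hj.1
      have h4 : j < ((fichasA t jug).length : Int) := hj.2
      have ha : i.toNat < (fichasA t jug).length := by omega
      have hb : j.toNat < (fichasA t jug).length := by omega
      refine ⟨⟨i.toNat, ha, j.toNat, hb, by omega, ?_⟩, hc⟩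
      rwa [PySem.List.pyGetD_eq_getElem (fichasA t jug) (0, 0) h1 h2, PySem.List.pyGetD_eq_getElem (fichasA t jug) (0, 0) (by omega) h4] at hr
    · rintro ⟨⟨a, ha, b, hb, hab, hr⟩, hc⟩
      refine ⟨(a : Int), ?_, (b : Int), ?_, ?_, hc⟩
      · rw [PySem.List.mem_pyRange_one]; constructor <;> [positivity; exact_mod_cast ha]
      · rw [PySem.List.mem_pyRange_one]; constructor <;> [omega; exact_mod_cast hb]
      · rw [PySem.List.pyGetD_eq_getElem (fichasA t jug) (0, 0) (by positivity) (by exact_mod_cast ha),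
          PySem.List.pyGetD_eq_getElem (fichasA t jug) (0, 0) (by positivity) (by exact_mod_cast hb)]
        simpa using hr
  rw [idx, exists_lt_pair_iff (fichasA t jug) (RA t p)
    (by rintro x y ⟨h1, h2, h3⟩; exact ⟨by rwa [hay_symm], h3, h2⟩)
    (by rintro x ⟨h1, _⟩; simp [hay_irrefl] at h1)]
  unfold Pend
  constructor
  · rintro ⟨⟨q1, hq1, q2, hq2, hhay, hp1, hp2⟩, hc⟩
    have m1 := mem_adyA.1 hp1
    have m2 := mem_adyA.1 hp2
    exact ⟨m1.2, hc, q1, q2, mem_fichasA.1 hq1, mem_fichasA.1 hq2, hhay,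
      adj_symm m1.1, adj_symm m2.1⟩
  · rintro ⟨hinb, hc, q1, q2, hf1, hf2, hhay, ha1, ha2⟩
    refine ⟨⟨q1, mem_fichasA.2 hf1, q2, mem_fichasA.2 hf2, hhay, ?_, ?_⟩, hc⟩
    · exact mem_adyA.2 ⟨adj_symm ha1, hinb⟩
    · exact mem_adyA.2 ⟨adj_symm ha2, hinb⟩

-- B's row-major scan, characterised
def condB (t : List (List Int)) (jug i j : Int) : Bool :=
  (cellAt t i j == 0) &&
    ((PySem.List.enumerate (vecinosB t jug (t.length : Int) i j) 0).any (fun kp =>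
      (PySem.List.slice (vecinosB t jug (t.length : Int) i j) (some (kp.1 + 1)) none).any
        (fun q => hayPuente kp.2 q)))

def rowB (t : List (List Int)) (jug i : Int) : List (Int × Int) :=
  ((PySem.List.pyRange 0 (t.length : Int) 1).filter (fun j => condB t jug i j)).map
    (fun j => ((i, j) : Int × Int))

def fullB (t : List (List Int)) (jug : Int) : List (Int × Int) :=
  (PySem.List.pyRange 0 (t.length : Int) 1).flatMap (rowB t jug)

lemma add_fresh {α : Type} [BEq α] [LawfulBEq α] (s : List α) (x : α) (h : x ∉ s) :
    PySem.Set.add s x = s ++ [x] := by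
  simp [PySem.Set.add, PySem.Set.contains, h]

lemma foldl_range_addif {α : Type} [BEq α] [LawfulBEq α] (g : Int → α) (c : Int → Bool)
    (hg : ∀ x y, g x = g y → x = y) :
    ∀ (m : Nat) (a b : Int), (b - a).toNat = m → ∀ (s : List α), (∀ j, a ≤ j → g j ∉ s) →
      (PySem.List.pyRange a b 1).foldl (fun s j => if c j then PySem.Set.add s (g j) else s) s
        = s ++ ((PySem.List.pyRange a b 1).filter c).map g := by
  intro m
  induction m with
  | zero =>
    intro a b hm s hs
    rw [PySem.List.pyRange_one_eq_nil (by omega)]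
    simp
  | succ m ih =>
    intro a b hm s hs
    have hab : a < b := by omega
    rw [PySem.List.pyRange_one_cons hab]
    simp only [List.foldl_cons, List.filter_cons]
    by_cases hc : c a
    · rw [if_pos hc, add_fresh _ _ (hs a le_rfl),
        ih (a + 1) b (by omega) _ ?_]
      · simp [hc]
      · intro j hj hmem
        rcases List.mem_append.1 hmem with h | h
        · exact hs j (by omega) h
        · simp only [List.mem_singleton] at h
          exact absurd (hg _ _ h) (by omega)
    · rw [if_neg hc, ih (a + 1) b (by omega) s (fun j hj => hs j (by omega))]
      simp [hc]

lemma foldl_outer (t : List (List Int)) (jug : Int) :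
    ∀ (m : Nat) (a : Int), ((t.length : Int) - a).toNat = m →
      ∀ (s : List (Int × Int)), (∀ q : Int × Int, a ≤ q.1 → q ∉ s) →
        (PySem.List.pyRange a (t.length : Int) 1).foldl (fun s i =>
          (PySem.List.pyRange 0 (t.length : Int) 1).foldl (fun s j =>
            if condB t jug i j then PySem.Set.add s (i, j) else s) s) s
          = s ++ (PySem.List.pyRange a (t.length : Int) 1).flatMap (rowB t jug) := by
  intro m
  induction m with
  | zero =>
    intro a hm s hs
    rw [PySem.List.pyRange_one_eq_nil (show (t.length : Int) ≤ a by omega)]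
    simp
  | succ m ih =>
    intro a hm s hs
    have hab : a < (t.length : Int) := by omega
    rw [PySem.List.pyRange_one_cons hab]
    simp only [List.foldl_cons, List.flatMap_cons]
    rw [foldl_range_addif (fun j => ((a, j) : Int × Int)) (condB t jug a)
        (fun x y h => by simpa using h) ((t.length : Int) - 0).toNat 0 (t.length : Int) rfl s
        (fun j _ => hs (a, j) le_rfl),
      ih (a + 1) (by omega) _ ?_]
    · rw [List.append_assoc]
      rfl
    · intro q hq hmem
      rcases List.mem_append.1 hmem with h | h
      · exact hs q (by omega) h
      · simp only [List.mem_map, List.mem_filter] at h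
        obtain ⟨j, _, rfl⟩ := h
        have hq' : a + 1 ≤ a := hq
        omega

lemma alt_eq_fullB (t : List (List Int)) (jug : Int) :
    puentes_pendientes_alt t jug = fullB t jug := by
  show (PySem.List.pyRange 0 (t.length : Int) 1).foldl _ PySem.Set.empty = _
  have hstep : ∀ (i : Int) (s : List (Int × Int)),
      (PySem.List.pyRange 0 (t.length : Int) 1).foldl (fun s j =>
        if cellAt t i j == 0 then
          if (PySem.List.enumerate (vecinosB t jug (t.length : Int) i j) 0).any (fun kp =>
              (PySem.List.slice (vecinosB t jug (t.length : Int) i j) (some (kp.1 + 1)) none).any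
                (fun q => hayPuente kp.2 q)) then
            PySem.Set.add s (i, j)
          else s
        else s) s
        = (PySem.List.pyRange 0 (t.length : Int) 1).foldl (fun s j =>
            if condB t jug i j then PySem.Set.add s (i, j) else s) s := by
    intro i s
    apply List.foldl_ext
    intro s' j _
    simp only [condB, Bool.and_eq_true]
    split_ifs with h1 h2 h3 h3 <;> simp_all
  calc (PySem.List.pyRange 0 (t.length : Int) 1).foldl (fun s i =>
          (PySem.List.pyRange 0 (t.length : Int) 1).foldl (fun s j =>
            if cellAt t i j == 0 then
              if (PySem.List.enumerate (vecinosB t jug (t.length : Int) i j) 0).any (fun kp =>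
                  (PySem.List.slice (vecinosB t jug (t.length : Int) i j) (some (kp.1 + 1)) none).any
                    (fun q => hayPuente kp.2 q)) then
                PySem.Set.add s (i, j)
              else s
            else s) s) PySem.Set.empty
      = (PySem.List.pyRange 0 (t.length : Int) 1).foldl (fun s i =>
          (PySem.List.pyRange 0 (t.length : Int) 1).foldl (fun s j =>
            if condB t jug i j then PySem.Set.add s (i, j) else s) s) PySem.Set.empty := by
        apply List.foldl_ext
        intro s i _
        exact hstep i s
    _ = fullB t jug := by
        rw [foldl_outer t jug ((t.length : Int) - 0).toNat 0 rfl _ (by simp [PySem.Set.empty])]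
        simp [fullB, PySem.Set.empty]

lemma condB_iff {t : List (List Int)} {jug i j : Int} :
    condB t jug i j = true ↔
      (cellAt t i j = 0 ∧ ∃ q1 q2, Ficha t jug q1 ∧ Ficha t jug q2 ∧ hayPuente q1 q2 = true ∧
        Adj (i, j) q1 ∧ Adj (i, j) q2) := by
  simp only [condB, Bool.and_eq_true, beq_iff_eq]
  constructor
  · rintro ⟨hc, hany⟩
    refine ⟨hc, ?_⟩
    rw [List.any_eq_true] at hany
    obtain ⟨kp, hkp, hq⟩ := hany
    rw [PySem.List.mem_enumerate_iff] at hkp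
    obtain ⟨k, hk, rfl⟩ := hkp
    rw [List.any_eq_true] at hq
    obtain ⟨q, hqmem, hay⟩ := hq
    have hcast : ((0 : Int) + (k : Int) + 1) = ((k + 1 : Nat) : Int) := by push_cast; ring
    rw [hcast, PySem.List.slice_from_natCast] at hqmem
    have hv1 := List.getElem_mem hk
    have hv2 := List.mem_of_mem_drop hqmem
    have m1 := mem_vecinosB.1 hv1
    have m2 := mem_vecinosB.1 hv2
    exact ⟨_, _, ⟨m1.2.1, m1.2.2⟩, ⟨m2.2.1, m2.2.2⟩, hay, m1.1, m2.1⟩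
  · rintro ⟨hc, q1, q2, hf1, hf2, hay, ha1, ha2⟩
    refine ⟨hc, ?_⟩
    have hpair : ∃ x ∈ vecinosB t jug (t.length : Int) i j,
        ∃ y ∈ vecinosB t jug (t.length : Int) i j, hayPuente x y = true := by
      exact ⟨q1, mem_vecinosB.2 ⟨ha1, hf1.1, hf1.2⟩, q2, mem_vecinosB.2 ⟨ha2, hf2.1, hf2.2⟩, hay⟩
    rw [← exists_lt_pair_iff _ _ (fun x y h => by rwa [hay_symm])
      (fun x h => by simp [hay_irrefl] at h)] at hpair
    obtain ⟨a, ha, b, hb, hab, hr⟩ := hpair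
    rw [List.any_eq_true]
    refine ⟨((0 : Int) + (a : Nat), (vecinosB t jug (t.length : Int) i j)[a]),
      (PySem.List.mem_enumerate_iff _ _ _).2 ⟨a, ha, rfl⟩, ?_⟩
    rw [List.any_eq_true]
    have hcast : ((0 : Int) + (a : Int) + 1) = ((a + 1 : Nat) : Int) := by push_cast; ring
    refine ⟨(vecinosB t jug (t.length : Int) i j)[b], ?_, hr⟩
    rw [hcast, PySem.List.slice_from_natCast]
    rw [List.mem_iff_getElem]
    refine ⟨b - (a + 1), by simp [List.length_drop]; omega, ?_⟩
    rw [List.getElem_drop]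
    congr 1
    omega

lemma mem_fullB {t : List (List Int)} {jug : Int} {p : Int × Int} :
    p ∈ fullB t jug ↔ Pend t jug p := by
  simp only [fullB, rowB, List.mem_flatMap, List.mem_map, List.mem_filter,
    PySem.List.mem_pyRange_one]
  constructor
  · rintro ⟨i, hi, j, ⟨hj, hcond⟩, rfl⟩
    obtain ⟨hc, hex⟩ := condB_iff.1 hcond
    exact ⟨⟨hi.1, hi.2, hj.1, hj.2⟩, hc, hex⟩
  · rintro ⟨hinb, hc, hex⟩
    refine ⟨p.1, ⟨hinb.1, hinb.2.1⟩, p.2, ⟨⟨hinb.2.2.1, hinb.2.2.2⟩, condB_iff.2 ⟨hc, ?_⟩⟩, rfl⟩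
    simpa using hex

lemma pairwise_fullB (t : List (List Int)) (jug : Int) :
    (fullB t jug).Pairwise
      (fun p q => p.1 * (t.length : Int) + p.2 < q.1 * (t.length : Int) + q.2) := by
  unfold fullB
  rw [List.pairwise_flatMap]
  constructor
  · intro i _
    unfold rowB
    rw [List.pairwise_map]
    exact ((PySem.List.pairwise_lt_pyRange_one 0 (t.length : Int)).filter _).imp
      (fun h => by simpa using h)
  · refine ((PySem.List.pairwise_lt_pyRange_one 0 (t.length : Int)).imp ?_)
    intro i i' hii x hx y hy
    simp only [rowB, List.mem_map, List.mem_filter, PySem.List.mem_pyRange_one] at hx hy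
    obtain ⟨j, ⟨hj, _⟩, rfl⟩ := hx
    obtain ⟨j', ⟨hj', _⟩, rfl⟩ := hy
    have h1 : i * (t.length : Int) + j < i * (t.length : Int) + (t.length : Int) := by omega
    have h2 : (i + 1) * (t.length : Int) ≤ i' * (t.length : Int) :=
      mul_le_mul_of_nonneg_right (by omega) (by positivity)
    nlinarith [hj'.1]

lemma nodup_fullB (t : List (List Int)) (jug : Int) : (fullB t jug).Nodup := by
  refine (pairwise_fullB t jug).imp ?_
  intro a b hlt heq
  rw [heq] at hlt
  exact lt_irrefl _ hlt

lemma nodup_pendAset (t : List (List Int)) (jug : Int) : (pendAset t jug).Nodup := by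
  unfold pendAset
  apply nodup_foldl _ ?_ _ _ (by simp [PySem.Set.empty])
  intro s i hs
  apply nodup_foldl _ ?_ _ _ hs
  intro s' j hs'
  split_ifs with hp
  · apply nodup_foldl _ ?_ _ _ hs'
    intro s'' q hs''
    split_ifs with hc
    · exact PySem.Set.nodup_add _ _ hs''
    · exact hs''
  · exact hs'

-- ===== VERDICT (by name: the statement is the Claim_ definition above) =====
theorem puentes_pendientes_spec : Claim_equal_puentes_pendientes := by
  intro tablero jugador _ _
  unfold Spec_puentes_pendientes
  rw [puentes_pendientes_eq_sorted, alt_eq_fullB]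
  refine PySem.List.sorted_eq_of_perm_of_pairwise_lt _ _ _ ?_ (pairwise_fullB tablero jugador)
  exact (List.perm_ext_iff_of_nodup (nodup_fullB tablero jugador)
    (nodup_pendAset tablero jugador)).2
    (fun p => mem_fullB.trans mem_pendAset.symm)
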